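-- pv_equiv track=rewrite | github.com/AirinB/Numeric_Matrix_Processor | Numeric Matrix Processor/task/processor/processor.py | sideDiagonalTranspose
-- ===== SOURCE A (Python) =====
-- def sideDiagonalTranspose(n, m, matrix):
--     transposed = []
--     rows = list(range(n))
--     rows.reverse()
--     col = list(range(m))
--     col.reverse()
--     counter_row = 0
--     counter_col = 0
--
--     for i in rows:
--         transposed.append([])
--         for j in col:
--             transposed[counter_row].append(matrix[j][i])
--
--         counter_row += 1
--     return transposed
-- ===== SOURCE B (Python) =====
-- def sideDiagonalTranspose(n, m, matrix):
--     buckets = [[] for _ in range(n)]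
--     for j in range(m - 1, -1, -1):
--         for i in range(n):
--             buckets[n - 1 - i].append(matrix[j][i])
--     return buckets
-- ===== Notes on version B (the rewrite author's own statement) =====
-- stated objective: alternative
-- what changed: Replaces A's gather (building each output row in turn by reading matrix[j][i] with two reverse-ordered index loops) by a scatter: one bottom-up row-major pass that distributes each element matrix[j][i] into output bucket n-1-i; Pre_ excludes exactly the inputs where A raises IndexError (n,m positive but the matrix smaller than m rows of n entries).
import Mathlib
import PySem

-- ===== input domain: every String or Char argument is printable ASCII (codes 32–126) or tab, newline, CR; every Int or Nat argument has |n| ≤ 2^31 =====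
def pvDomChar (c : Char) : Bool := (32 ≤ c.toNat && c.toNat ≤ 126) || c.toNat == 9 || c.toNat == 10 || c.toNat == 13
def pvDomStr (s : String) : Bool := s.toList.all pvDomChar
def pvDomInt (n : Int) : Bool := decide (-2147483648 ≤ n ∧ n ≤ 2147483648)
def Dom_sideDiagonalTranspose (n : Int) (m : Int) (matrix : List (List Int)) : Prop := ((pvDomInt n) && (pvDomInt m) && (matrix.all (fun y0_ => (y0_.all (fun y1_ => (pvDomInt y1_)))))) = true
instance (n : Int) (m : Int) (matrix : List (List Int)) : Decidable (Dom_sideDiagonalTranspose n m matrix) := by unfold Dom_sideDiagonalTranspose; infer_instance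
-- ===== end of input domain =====

-- B replaces A's cell-by-cell gather (reverse-ordered index loops building one output row at
-- a time) by a scatter pass: walk the input rows bottom-up in row-major order, distributing
-- each element into its output bucket. Same cost; neither program mutates its arguments.

-- ===== PORT A =====
def sideDiagonalTranspose (n : Int) (m : Int) (matrix : List (List Int)) : List (List Int) :=
  let rows := (PySem.List.pyRange 0 n 1).reverse
  let col := (PySem.List.pyRange 0 m 1).reverse
  -- 'transposed.append([])' then 'transposed[counter_row].append(...)' = append each finished row at the end
  rows.foldl (fun transposed i =>
    transposed ++ [col.foldl (fun r j =>
      r ++ [PySem.List.pyGetD (PySem.List.pyGetD matrix j []) i 0]) []]) []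

-- ===== PORT B =====
-- 'buckets[n-1-i]': inside the loop 0 ≤ i < n, so the Python index n-1-i is nonnegative
-- and '.toNat' is exact (no negative-index wraparound can occur).
def sideDiagonalTranspose_alt (n : Int) (m : Int) (matrix : List (List Int)) : List (List Int) :=
  let buckets := (PySem.List.pyRange 0 n 1).map (fun _ => ([] : List Int))
  (PySem.List.pyRange (m - 1) (-1) (-1)).foldl
    (fun out j =>
      (PySem.List.pyRange 0 n 1).foldl
        (fun out i =>
          out.modify ((n - 1 - i).toNat)
            (fun v => v ++ [PySem.List.pyGetD (PySem.List.pyGetD matrix j []) i 0]))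
        out)
    buckets

-- ===== PRECONDITION & SPEC =====
-- Pre_ = exactly the inputs on which the Python A returns (no IndexError): when both n and m
-- are positive, the matrix needs at least m rows whose first m rows each have at least n entries.
def Pre_sideDiagonalTranspose (n : Int) (m : Int) (matrix : List (List Int)) : Prop :=
  0 < n → 0 < m →
    m ≤ (matrix.length : Int) ∧ ∀ row ∈ matrix.take m.toNat, n ≤ (row.length : Int)
instance (n : Int) (m : Int) (matrix : List (List Int)) : Decidable (Pre_sideDiagonalTranspose n m matrix) := by unfold Pre_sideDiagonalTranspose; infer_instance

def pvWitness_sideDiagonalTranspose : Int × Int × List (List Int) := (2, 3, [[1, 2], [3, 4], [5, 6]])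

def Spec_sideDiagonalTranspose (n : Int) (m : Int) (matrix : List (List Int)) (out : List (List Int)) : Prop := out = sideDiagonalTranspose_alt n m matrix
instance (n : Int) (m : Int) (matrix : List (List Int)) (out : List (List Int)) : Decidable (Spec_sideDiagonalTranspose n m matrix out) := by unfold Spec_sideDiagonalTranspose; infer_instance

-- ===== CLAIM (what is proved, stated in full; the proofs are below) =====
def Claim_equal_sideDiagonalTranspose : Prop := ∀ (n : Int) (m : Int) (matrix : List (List Int)), Dom_sideDiagonalTranspose n m matrix → Pre_sideDiagonalTranspose n m matrix → Spec_sideDiagonalTranspose n m matrix (sideDiagonalTranspose n m matrix)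

-- ===== LEMMAS AND PROOFS =====

-- B's inner loop, named (proof-local abbreviation)
def pvInnerF (n : Int) (row : List Int) (out : List (List Int)) : List (List Int) :=
  (PySem.List.pyRange 0 n 1).foldl
    (fun out i =>
      out.modify ((n - 1 - i).toNat) (fun v => v ++ [PySem.List.pyGetD row i 0]))
    out

theorem pvModFold_len (n : Int) (row : List Int) : ∀ (is : List Int) (out : List (List Int)),
    (is.foldl (fun out i =>
      out.modify ((n - 1 - i).toNat) (fun v => v ++ [PySem.List.pyGetD row i 0])) out).length
      = out.length := by
  intro is
  induction is with
  | nil => intro out; rfl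
  | cons i t ih => intro out; simp only [List.foldl_cons]; rw [ih]; simp

-- each index i of the inner loop touches exactly bucket n-1-i
theorem pvInner_go (n : Int) (row : List Int) : ∀ (cnt : Nat) (a : Int) (out : List (List Int)),
    0 ≤ a → a + cnt ≤ n → out.length = n.toNat → ∀ k : Nat, (k : Int) < n →
    (((List.range cnt).map (fun (t : Nat) => a + (t : Int))).foldl
      (fun out i =>
        out.modify ((n - 1 - i).toNat) (fun v => v ++ [PySem.List.pyGetD row i 0])) out).getD k []
      = out.getD k [] ++
          (if a ≤ n - 1 - (k : Int) ∧ n - 1 - (k : Int) < a + cnt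
           then [row.getD (n - 1 - (k : Int)).toNat 0] else []) := by
  intro cnt
  induction cnt with
  | zero =>
    intro a out ha hle hlen k hk
    rw [if_neg (by push_cast; omega)]
    simp
  | succ c ih =>
    intro a out ha hle hlen k hk
    have hle' : a + (c : Int) + 1 ≤ n := by push_cast at hle; omega
    have hkl : k < out.length := by omega
    rw [List.range_succ, List.map_append, List.foldl_append]
    simp only [List.map_cons, List.map_nil, List.foldl_cons, List.foldl_nil]
    have hflen : (((List.range c).map (fun (t : Nat) => a + (t : Int))).foldl
        (fun out i =>
          out.modify ((n - 1 - i).toNat) (fun v => v ++ [PySem.List.pyGetD row i 0])) out).length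
        = out.length := pvModFold_len n row _ out
    rw [List.getD_eq_getElem _ _ (by rw [List.length_modify, hflen]; exact hkl),
        List.getElem_modify, ← List.getD_eq_getElem _ ([] : List Int) (by rw [hflen]; exact hkl)]
    rw [ih a out ha (by push_cast; omega) hlen k hk]
    by_cases hik : (n - 1 - (a + (c : Int))).toNat = k
    · have hieq : n - 1 - (a + (c : Int)) = (k : Int) := by omega
      rw [if_pos hik,
        if_neg (show ¬(a ≤ n - 1 - (k : Int) ∧ n - 1 - (k : Int) < a + (c : Int)) by omega),
        if_pos (show a ≤ n - 1 - (k : Int) ∧ n - 1 - (k : Int) < a + ((c + 1 : Nat) : Int) by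
          push_cast; omega)]
      have hv : PySem.List.pyGetD row (a + (c : Int)) 0 = row.getD (n - 1 - (k : Int)).toNat 0 := by
        rw [show a + (c : Int) = ((n - 1 - (k : Int)).toNat : Int) by omega,
            PySem.List.pyGetD_natCast]
      rw [hv]
      simp
    · rw [if_neg hik]
      by_cases hc : a ≤ n - 1 - (k : Int) ∧ n - 1 - (k : Int) < a + (c : Int)
      · rw [if_pos hc,
          if_pos (show a ≤ n - 1 - (k : Int) ∧ n - 1 - (k : Int) < a + ((c + 1 : Nat) : Int) by
            push_cast; omega)]
      · rw [if_neg hc,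
          if_neg (show ¬(a ≤ n - 1 - (k : Int) ∧ n - 1 - (k : Int) < a + ((c + 1 : Nat) : Int)) by
            push_cast; omega)]

-- the inner loop appends one element to every bucket
theorem pvInnerF_getD (n : Int) (hn : 0 < n) (row : List Int) (out : List (List Int))
    (hlen : out.length = n.toNat) (k : Nat) (hk : k < n.toNat) :
    (pvInnerF n row out).getD k [] = out.getD k [] ++ [row.getD (n.toNat - 1 - k) 0] := by
  unfold pvInnerF
  rw [PySem.List.pyRange_one 0 n]
  rw [pvInner_go n row (n - 0).toNat 0 out le_rfl (by omega) hlen k (by omega)]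
  rw [if_pos (by constructor <;> [omega; (push_cast; omega)])]
  have : (n - 1 - (k : Int)).toNat = n.toNat - 1 - k := by omega
  rw [this]

theorem pvInnerF_len (n : Int) (row : List Int) (out : List (List Int)) :
    (pvInnerF n row out).length = out.length := pvModFold_len n row _ out

-- the outer loop: each processed row appends one element to every bucket
theorem pvOuter_getD (n : Int) (hn : 0 < n) (matrix : List (List Int)) :
    ∀ (js : List Int) (out : List (List Int)), out.length = n.toNat → ∀ k : Nat, k < n.toNat →
    (js.foldl (fun out j => pvInnerF n (PySem.List.pyGetD matrix j []) out) out).getD k [] =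
      out.getD k [] ++ js.map (fun j => (PySem.List.pyGetD matrix j []).getD (n.toNat - 1 - k) 0) := by
  intro js
  induction js with
  | nil => intro out _ k _; simp
  | cons j t ih =>
    intro out hlen k hk
    simp only [List.foldl_cons, List.map_cons]
    rw [ih _ (by rw [pvInnerF_len]; exact hlen) k hk]
    rw [pvInnerF_getD n hn _ out hlen k hk]
    simp

theorem pvOuter_len (n : Int) (matrix : List (List Int)) :
    ∀ (js : List Int) (out : List (List Int)),
    (js.foldl (fun out j => pvInnerF n (PySem.List.pyGetD matrix j []) out) out).length
      = out.length := by
  intro js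
  induction js with
  | nil => intro out; rfl
  | cons j t ih => intro out; simp only [List.foldl_cons]; rw [ih, pvInnerF_len]

theorem foldl_snoc_map {α β : Type} (f : α → β) : ∀ (l : List α) (init : List β),
    l.foldl (fun acc x => acc ++ [f x]) init = init ++ l.map f := by
  intro l
  induction l with
  | nil => simp
  | cons x xs ih => intro init; simp [ih]

-- A's two reverse-order append loops are maps over the reversed ranges
theorem sideDiagonalTranspose_eq_maps (n m : Int) (matrix : List (List Int)) :
    sideDiagonalTranspose n m matrix =
      ((PySem.List.pyRange 0 n 1).reverse).map (fun i =>
        ((PySem.List.pyRange 0 m 1).reverse).map (fun j =>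
          PySem.List.pyGetD (PySem.List.pyGetD matrix j []) i 0)) := by
  unfold sideDiagonalTranspose
  simp only [foldl_snoc_map, List.nil_append]

-- B's folds, written with the named inner loop
theorem sideDiagonalTranspose_alt_eq (n m : Int) (matrix : List (List Int)) :
    sideDiagonalTranspose_alt n m matrix =
      (PySem.List.pyRange (m - 1) (-1) (-1)).foldl
        (fun out j => pvInnerF n (PySem.List.pyGetD matrix j []) out)
        ((PySem.List.pyRange 0 n 1).map (fun _ => ([] : List Int))) := rfl

-- the two ports agree wherever A returns
theorem sideDiagonalTranspose_spec : Claim_equal_sideDiagonalTranspose := by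
  unfold Claim_equal_sideDiagonalTranspose
  intro n m matrix _ _
  unfold Spec_sideDiagonalTranspose
  rw [sideDiagonalTranspose_eq_maps, sideDiagonalTranspose_alt_eq]
  by_cases hn : 0 < n
  · by_cases hm : 0 < m
    · -- main case: both dimensions positive
      have houter : PySem.List.pyRange (m - 1) (-1) (-1) = (PySem.List.pyRange 0 m 1).reverse := by
        rw [PySem.List.pyRange_neg_one_eq_reverse]
        norm_num
      rw [houter]
      have hblen :
          ((PySem.List.pyRange 0 m 1).reverse.foldl
            (fun out j => pvInnerF n (PySem.List.pyGetD matrix j []) out)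
            ((PySem.List.pyRange 0 n 1).map (fun _ => ([] : List Int)))).length = n.toNat := by
        rw [pvOuter_len]
        simp [PySem.List.length_pyRange_one]
      apply List.ext_getElem
      · rw [hblen]
        simp [PySem.List.length_pyRange_one]
      · intro k hk1 hk2
        have hkn : k < n.toNat := by
          rw [hblen] at hk2; exact hk2
        rw [← List.getD_eq_getElem _ ([] : List Int) hk2]
        rw [pvOuter_getD n hn matrix _ _ (by simp [PySem.List.length_pyRange_one]) k hkn]
        have hb0 : (((PySem.List.pyRange 0 n 1)).map (fun _ => ([] : List Int))).getD k [] = [] := by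
          rw [List.getD_eq_getElem _ _ (by simp [PySem.List.length_pyRange_one]; omega)]
          simp
        rw [hb0, List.nil_append]
        rw [List.getElem_map, List.getElem_reverse]
        apply List.map_congr_left
        intro j _
        rw [PySem.List.getElem_pyRange_one]
        have hcast : (0 : Int) + ((((PySem.List.pyRange 0 n 1).length - 1 - k : Nat)) : Int)
            = ((n.toNat - 1 - k : Nat) : Int) := by
          rw [PySem.List.length_pyRange_one]
          omega
        rw [hcast, PySem.List.pyGetD_natCast]
    · -- m ≤ 0: no input rows; both sides are n empty rows
      have h1 : PySem.List.pyRange (m - 1) (-1) (-1) = [] :=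
        PySem.List.pyRange_neg_one_eq_nil (by omega)
      have h2 : PySem.List.pyRange 0 m 1 = [] :=
        PySem.List.pyRange_one_eq_nil (by omega)
      rw [h1, h2]
      simp [List.map_const']
  · -- n ≤ 0: no buckets; both sides are []
    have h0 : PySem.List.pyRange 0 n 1 = [] :=
      PySem.List.pyRange_one_eq_nil (by omega)
    rw [h0]
    simp only [List.reverse_nil, List.map_nil]
    have hfix : ∀ (js : List Int),
        js.foldl (fun out j => pvInnerF n (PySem.List.pyGetD matrix j []) out)
          ([] : List (List Int)) = [] := by
      intro js
      induction js with
      | nil => rfl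
      | cons j t ih =>
        simp only [List.foldl_cons]
        rw [show pvInnerF n (PySem.List.pyGetD matrix j []) [] = [] by
          unfold pvInnerF; rw [h0]; rfl]
        exact ih
    rw [hfix]
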